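-- pv_equiv track=rewrite | github.com/Coki628/kyopro_submissions | AtCoder/joisc2009day1-1.py | rec
-- ===== SOURCE A (Python) =====
-- def rec(size, row):
--     if size == 1:
--         return 'J'
--     nxtsize = size // 2
--     # 欲しい行が上半分か下半分かで場合分け
--     if row <= nxtsize:
--         return 'J' * nxtsize + 'O' * nxtsize
--     else:
--         return 'I' * nxtsize + rec(nxtsize, row - nxtsize)
-- ===== SOURCE B (Python) =====
-- def rec(size, row):
--     # Phase 1: arithmetic only — count how many 'I's accumulate and find the
--     # terminal block size (None means the size-1 base case was reached).
--     icount = 0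
--     while size > 1:
--         nxt = size // 2
--         if row <= nxt:
--             break
--         icount += nxt
--         row -= nxt
--         size = nxt
--     else:
--         return 'I' * icount + 'J'
--     # Phase 2: build the string once from the two computed numbers.
--     return 'I' * icount + 'J' * nxt + 'O' * nxt
-- ===== Notes on version B (the rewrite author's own statement) =====
-- stated objective: alternative
-- what changed: B separates the computation into an arithmetic phase that only tracks an integer counter of peeled 'I's (no string work in the loop) and a single final string construction, instead of A's recursion that concatenates partial strings at every level.
-- outside the precondition, e.g. on rec(0, 0): A returns '', B returns 'J'; on rec(-2, -3): A returns '', B returns 'J'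
import Mathlib
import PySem

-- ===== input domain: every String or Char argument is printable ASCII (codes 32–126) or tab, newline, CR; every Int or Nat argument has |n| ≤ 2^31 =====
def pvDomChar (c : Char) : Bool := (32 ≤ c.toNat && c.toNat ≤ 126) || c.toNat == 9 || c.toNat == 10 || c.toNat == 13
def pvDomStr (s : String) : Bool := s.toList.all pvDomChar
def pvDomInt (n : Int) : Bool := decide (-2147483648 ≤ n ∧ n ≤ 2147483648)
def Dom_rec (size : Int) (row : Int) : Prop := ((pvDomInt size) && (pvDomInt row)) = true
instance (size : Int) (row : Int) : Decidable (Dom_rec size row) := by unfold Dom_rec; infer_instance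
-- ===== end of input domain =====

-- B splits the work into an arithmetic loop over an integer 'I'-counter plus one final string construction, instead of A's recursion concatenating strings at each level (alternative decomposition, same cost).


-- ===== PORT A =====
-- literal port of A's recursion; the Nat fuel (= size.toNat) only makes the recursion
-- structural and is never exhausted when 1 ≤ size
def recAux : Nat → Int → Int → List Char
  | 0, _, _ => []
  | fuel + 1, size, row =>
    if size = 1 then ['J']
    else
      let nxtsize := PySem.Int.floordiv size 2
      if row ≤ nxtsize then
        PySem.List.pyRepeat ['J'] nxtsize ++ PySem.List.pyRepeat ['O'] nxtsize
      else
        PySem.List.pyRepeat ['I'] nxtsize ++ recAux fuel nxtsize (row - nxtsize)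

def rec (size : Int) (row : Int) : String := String.ofList (recAux size.toNat size row)

-- ===== PORT B =====
-- literal port of B's phase 1: a purely arithmetic loop returning (icount, some nxt) when the
-- break fires and (icount, none) when the while-condition fails (Python's while-else);
-- the fuel only bounds the loop and is never exhausted when 1 ≤ size
def recAltCount : Nat → Int → Int → Int → Int × Option Int
  | 0, icount, _, _ => (icount, none)
  | fuel + 1, icount, size, row =>
    if 1 < size then
      let nxt := PySem.Int.floordiv size 2
      if row ≤ nxt then (icount, some nxt)
      else recAltCount fuel (icount + nxt) nxt (row - nxt)
    else (icount, none)

-- phase 2: build the string once from the computed numbers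
def rec_alt (size : Int) (row : Int) : String :=
  match recAltCount size.toNat 0 size row with
  | (icount, none) => String.ofList (PySem.List.pyRepeat ['I'] icount ++ ['J'])
  | (icount, some nxt) =>
      String.ofList (PySem.List.pyRepeat ['I'] icount
        ++ PySem.List.pyRepeat ['J'] nxt ++ PySem.List.pyRepeat ['O'] nxt)

-- ===== PRECONDITION & SPEC =====
-- Pre_ excludes nonpositive sizes (outside the problem's natural domain): there A either
-- exceeds the recursion limit, or accidentally returns '' from empty string repeats.
def Pre_rec (size : Int) (row : Int) : Prop := 1 ≤ size
instance (size : Int) (row : Int) : Decidable (Pre_rec size row) := by unfold Pre_rec; infer_instance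
def pvWitness_rec : Int × Int := (8, 5)

def Spec_rec (size : Int) (row : Int) (out : String) : Prop := out = rec_alt size row
instance (size : Int) (row : Int) (out : String) : Decidable (Spec_rec size row out) := by unfold Spec_rec; infer_instance

-- ===== CLAIM (what is proved, stated in full; the proofs are below) =====
def Claim_equal_rec : Prop := ∀ (size : Int) (row : Int), Dom_rec size row → Pre_rec size row → Spec_rec size row (rec size row)

-- ===== LEMMAS AND PROOFS =====
lemma floordiv_two_pos {size : Int} (h : 2 ≤ size) : 1 ≤ PySem.Int.floordiv size 2 :=
  (PySem.Int.le_floordiv_iff_mul_le (by norm_num)).2 (by omega)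

lemma floordiv_two_lt {size : Int} (h : 2 ≤ size) : PySem.Int.floordiv size 2 < size :=
  (PySem.Int.floordiv_lt_iff_lt_mul (by norm_num)).2 (by omega)

lemma pyRepeat_add (a : Char) {m n : Int} (hm : 0 ≤ m) (hn : 0 ≤ n) :
    PySem.List.pyRepeat [a] (m + n)
      = PySem.List.pyRepeat [a] m ++ PySem.List.pyRepeat [a] n := by
  rw [PySem.List.pyRepeat_singleton, PySem.List.pyRepeat_singleton,
      PySem.List.pyRepeat_singleton, Int.toNat_add hm hn, List.replicate_add]

-- what phase 2 makes of phase 1's result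
def renderCount : Int × Option Int → List Char
  | (icount, none) => PySem.List.pyRepeat ['I'] icount ++ ['J']
  | (icount, some nxt) =>
      PySem.List.pyRepeat ['I'] icount
        ++ PySem.List.pyRepeat ['J'] nxt ++ PySem.List.pyRepeat ['O'] nxt

lemma count_eq_aux : ∀ (fuel : Nat) (size row icount : Int),
    0 ≤ icount → 1 ≤ size → size ≤ (fuel : Int) →
    renderCount (recAltCount fuel icount size row)
      = PySem.List.pyRepeat ['I'] icount ++ recAux fuel size row := by
  intro fuel
  induction fuel with
  | zero => intro size row icount h0 h1 h2; omega
  | succ n ih =>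
    intro size row icount h0 h1 h2
    by_cases hs : size = 1
    · subst hs
      simp [recAltCount, recAux, renderCount]
    · have h2s : 2 ≤ size := by omega
      have hpos := floordiv_two_pos h2s
      have hlt := floordiv_two_lt h2s
      have hfd : PySem.Int.floordiv size 2 = size / 2 := by
        simp [PySem.Int.floordiv, Int.fdiv_eq_ediv]
      rw [hfd] at hpos hlt
      by_cases hr : row ≤ size / 2
      · simp [recAltCount, recAux, hs, hr, show 1 < size by omega, renderCount,
          List.append_assoc]
      · simp only [recAltCount, recAux, hs, hfd, hr, if_false, show 1 < size by omega, if_true]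
        rw [ih _ _ _ (by omega) hpos (by omega),
            pyRepeat_add 'I' h0 (by omega), List.append_assoc]

-- ===== VERDICT (by name: the statement is the Claim_ definition above) =====
theorem rec_spec : Claim_equal_rec := by
  intro size row _ hpre
  unfold Spec_rec rec rec_alt
  have h := count_eq_aux size.toNat size row 0 le_rfl hpre (by omega)
  rcases hc : recAltCount size.toNat 0 size row with ⟨ic, nxt?⟩
  rw [hc] at h
  cases nxt? <;>
    simp_all [renderCount, PySem.List.pyRepeat_singleton]
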